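-- pv_equiv track=rewrite | github.com/DaniFdezAlvarez/shexerp3 | test/t_utils.py | shape_contains_constraint
-- ===== SOURCE A (Python) =====
-- _BEG_SHAPE = "{"
--
-- _END_SHAPE = "}"
--
-- def shape_contains_constraint(target_str, shape, constraint):
--     constraint = constraint.replace(";","").strip()
--     lines = target_str.split("\n")
--     seeking_mode = False
--     for i in range(len(lines)):
--         if seeking_mode:
--             if lines[i].replace(";", "").strip() == constraint:
--                 return True
--             if lines[i].startswith(_END_SHAPE):
--                 return False
--         if lines[i].startswith(_BEG_SHAPE) and shape == lines[i-1].strip():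
--             seeking_mode = True
--     return False
-- ===== SOURCE B (Python) =====
-- def shape_contains_constraint(target_str, shape, constraint):
--     wanted = constraint.replace(";", "").strip()
--     lines = target_str.split("\n")
--     triggers = [i for i in range(len(lines))
--                 if lines[i].startswith("{") and lines[i - 1].strip() == shape]
--     if not triggers:
--         return False
--     body = lines[triggers[0] + 1:]
--     ends = [j for j in range(len(body)) if body[j].startswith("}")]
--     limit = ends[0] + 1 if ends else len(body)
--     return any(ln.replace(";", "").strip() == wanted for ln in body[:limit])
-- ===== Notes on version B (the rewrite author's own statement) =====
-- stated objective: simpler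
-- what changed: Replaced A's stateful single loop (seeking_mode flag, early returns, negative-index lookback) by a declarative staged computation: a comprehension listing all '{' header indices whose preceding line matches the shape, a slice taking the body after the first one, a comprehension listing all '}' indices, and one any() over the prefix up to the first of those.
import Mathlib
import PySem

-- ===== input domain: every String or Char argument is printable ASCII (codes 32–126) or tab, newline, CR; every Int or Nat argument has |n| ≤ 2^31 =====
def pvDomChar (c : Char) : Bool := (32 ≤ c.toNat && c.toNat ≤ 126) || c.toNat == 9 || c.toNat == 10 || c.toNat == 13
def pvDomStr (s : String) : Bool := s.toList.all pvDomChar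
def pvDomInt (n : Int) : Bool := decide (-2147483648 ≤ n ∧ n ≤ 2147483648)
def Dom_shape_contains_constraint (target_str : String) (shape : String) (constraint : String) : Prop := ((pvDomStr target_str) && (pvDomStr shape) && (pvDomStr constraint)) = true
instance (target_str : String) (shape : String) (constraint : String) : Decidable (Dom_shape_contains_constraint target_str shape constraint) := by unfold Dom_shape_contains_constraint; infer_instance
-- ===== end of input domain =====

-- B replaces A's stateful flag loop by a declarative staged computation: list all header
-- indices by comprehension, slice the body after the first one, list all '}' indices, and
-- test the prefix up to the first of those with any(); objective: simpler, same cost.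

-- ===== PORT A =====
-- A's loop over range(len(lines)) with the seeking_mode flag; lines[i] / lines[i-1]
-- via PySem.List.pyGet? (never none here: i < len and lines from split is nonempty).
def pvALoop (lines : List String) (constraint shape : String) (seeking : Bool) (i : Nat) : Bool :=
  if _h : i < lines.length then
    let li := (PySem.List.pyGet? lines (i : Int)).getD ""
    if seeking && (PySem.Str.strip (PySem.Str.replace li ";" "") == constraint) then true
    else if seeking && PySem.Str.startswith li "}" then false
    else
      pvALoop lines constraint shape
        (seeking || (PySem.Str.startswith li "{" &&
          (shape == PySem.Str.strip ((PySem.List.pyGet? lines ((i : Int) - 1)).getD ""))))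
        (i + 1)
  else false
termination_by lines.length - i

def shape_contains_constraint (target_str : String) (shape : String) (constraint : String) : Bool :=
  let constraint := PySem.Str.strip (PySem.Str.replace constraint ";" "")
  let lines := (PySem.Str.split? target_str "\n").getD []
  pvALoop lines constraint shape false 0

-- ===== PORT B =====
def shape_contains_constraint_alt (target_str : String) (shape : String) (constraint : String) : Bool :=
  let wanted := PySem.Str.strip (PySem.Str.replace constraint ";" "")
  let lines := (PySem.Str.split? target_str "\n").getD []
  -- triggers = [i for i in range(len(lines)) if lines[i].startswith("{") and lines[i-1].strip() == shape]
  let triggers := (PySem.List.pyRange 0 (lines.length : Int) 1).filter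
    (fun i => PySem.Str.startswith ((PySem.List.pyGet? lines i).getD "") "{" &&
      (PySem.Str.strip ((PySem.List.pyGet? lines (i - 1)).getD "") == shape))
  match triggers with
  | [] => false
  | t :: _ =>
    -- body = lines[triggers[0] + 1:]
    let body := PySem.List.slice lines (some (t + 1)) none
    -- ends = [j for j in range(len(body)) if body[j].startswith("}")]
    let ends := (PySem.List.pyRange 0 (body.length : Int) 1).filter
      (fun j => PySem.Str.startswith ((PySem.List.pyGet? body j).getD "") "}")
    -- limit = ends[0] + 1 if ends else len(body)
    let limit : Int := match ends with | [] => (body.length : Int) | e :: _ => e + 1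
    -- any(ln.replace(";","").strip() == wanted for ln in body[:limit])
    (PySem.List.slice body none (some limit)).any
      (fun ln => PySem.Str.strip (PySem.Str.replace ln ";" "") == wanted)

-- ===== PRECONDITION & SPEC =====
def Spec_shape_contains_constraint (target_str : String) (shape : String) (constraint : String) (out : Bool) : Prop := out = shape_contains_constraint_alt target_str shape constraint
instance (target_str : String) (shape : String) (constraint : String) (out : Bool) : Decidable (Spec_shape_contains_constraint target_str shape constraint out) := by unfold Spec_shape_contains_constraint; infer_instance

-- ===== CLAIM (what is proved, stated in full; the proofs are below) =====
def Claim_equal_shape_contains_constraint : Prop := ∀ (target_str : String) (shape : String) (constraint : String), Dom_shape_contains_constraint target_str shape constraint → Spec_shape_contains_constraint target_str shape constraint (shape_contains_constraint target_str shape constraint)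

-- ===== LEMMAS AND PROOFS =====

-- filter over pyRange 0 n 1 = filter over List.range n, mapped to Int
theorem pv_filter_pyRange (P : Int → Bool) (n : Nat) :
    (PySem.List.pyRange 0 (n : Int) 1).filter P =
      (List.filter (fun k : Nat => P (k : Int)) (List.range n)).map (fun k : Nat => (k : Int)) := by
  rw [PySem.List.pyRange_one, List.filter_map,
    show (P ∘ fun k : Nat => (0 : Int) + (k : Int)) = (fun k : Nat => P (k : Int)) from by
      funext k; simp [Function.comp],
    show (fun k : Nat => (0 : Int) + (k : Int)) = (fun k : Nat => (k : Int)) from by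
      funext k; simp]
  simp

-- proof-side sequential body scan (A's seeking loop over a plain list)
def pvScan (wanted : String) : List String → Bool
  | [] => false
  | ln :: rest =>
    if PySem.Str.strip (PySem.Str.replace ln ";" "") == wanted then true
    else if PySem.Str.startswith ln "}" then false
    else pvScan wanted rest

-- The sequential scan equals B's declarative phase 2: any() over the prefix up to the
-- first '}' line (inclusive), or the whole body if there is none.
theorem pvScan_eq_decl (c : String) (body : List String) :
    pvScan c body =
      (body.take ((((List.filter (fun k : Nat => PySem.Str.startswith (body[k]?.getD "") "}")
            (List.range body.length)).head?.map (· + 1)).getD body.length))).any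
        (fun ln => PySem.Str.strip (PySem.Str.replace ln ";" "") == c) := by
  induction body with
  | nil => simp [pvScan]
  | cons a rest ih =>
    have hpred : ((fun k : Nat => PySem.Str.startswith ((a :: rest)[k]?.getD "") "}") ∘ Nat.succ)
        = (fun k : Nat => PySem.Str.startswith (rest[k]?.getD "") "}") := by
      funext k; simp [Function.comp]
    rw [show (a :: rest).length = rest.length + 1 from rfl, List.range_succ_eq_map,
      List.filter_cons, List.filter_map, hpred]
    simp only [List.getElem?_cons_zero, Option.getD_some]
    by_cases he : PySem.Str.startswith a "}" = true
    · rw [if_pos he, pvScan]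
      simp only [List.head?_cons, Option.map_some, Option.getD_some, List.take_succ_cons,
        List.take_zero, List.any_cons, List.any_nil, Bool.or_false]
      by_cases hm : (PySem.Str.strip (PySem.Str.replace a ";" "") == c) = true
      · rw [if_pos hm, hm]
      · rw [if_neg hm, if_pos he]
        rw [Bool.not_eq_true] at hm
        exact hm.symm
    · rw [if_neg he, pvScan, ih]
      cases hF : List.filter (fun k : Nat => PySem.Str.startswith (rest[k]?.getD "") "}")
          (List.range rest.length) with
      | nil =>
        simp only [List.map_nil, List.head?_nil, Option.map_none, Option.getD_none,
          List.take_succ_cons, List.any_cons]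
        by_cases hm : (PySem.Str.strip (PySem.Str.replace a ";" "") == c) = true
        · rw [if_pos hm, hm, Bool.true_or]
        · rw [if_neg hm, if_neg he]
          rw [Bool.not_eq_true] at hm
          rw [hm, Bool.false_or]
      | cons j tl =>
        simp only [List.map_cons, List.head?_cons, Option.map_some, Option.getD_some,
          List.take_succ_cons, List.any_cons]
        by_cases hm : (PySem.Str.strip (PySem.Str.replace a ";" "") == c) = true
        · rw [if_pos hm, hm, Bool.true_or]
        · rw [if_neg hm, if_neg he]
          rw [Bool.not_eq_true] at hm
          rw [hm, Bool.false_or]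

-- the trigger predicate of line k (Python's lines[k].startswith("{") and shape == lines[k-1].strip())
def pvTrig (lines : List String) (shape : String) (k : Nat) : Bool :=
  PySem.Str.startswith (lines[k]?.getD "") "{" &&
    (shape == PySem.Str.strip ((PySem.List.pyGet? lines ((k : Int) - 1)).getD ""))

-- once seeking, A's remaining loop is the sequential scan of the remaining lines
theorem pvALoop_seeking (lines : List String) (c shape : String) (i : Nat) :
    pvALoop lines c shape true i = pvScan c (lines.drop i) := by
  generalize hk : lines.length - i = k
  induction k generalizing i with
  | zero =>
    rw [pvALoop]
    have h : ¬ i < lines.length := by omega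
    simp [h, List.drop_eq_nil_of_le (by omega : lines.length ≤ i), pvScan]
  | succ k ih =>
    have hi : i < lines.length := by omega
    have hd : lines.drop i = lines[i] :: lines.drop (i + 1) := List.drop_eq_getElem_cons hi
    rw [pvALoop]
    simp only [hi, dif_pos, PySem.List.pyGet?_natCast, List.getElem?_eq_getElem hi,
      Option.getD_some, Bool.true_and, Bool.true_or, hd, pvScan]
    split
    · rfl
    · split
      · rfl
      · exact ih (i + 1) (by omega)

-- with seeking off, A's loop from index i equals: first trigger index k ≥ i, then scan of drop (k+1)
theorem pvALoop_find (lines : List String) (c shape : String) (i : Nat) :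
    pvALoop lines c shape false i =
      (match (List.range' i (lines.length - i)).filter (pvTrig lines shape) with
        | [] => false
        | k :: _ => pvScan c (lines.drop (k + 1))) := by
  generalize hk : lines.length - i = k
  induction k generalizing i with
  | zero =>
    rw [pvALoop]
    have h : ¬ i < lines.length := by omega
    simp [h, List.range']
  | succ k ih =>
    have hi : i < lines.length := by omega
    rw [pvALoop]
    simp only [hi, dif_pos, PySem.List.pyGet?_natCast, List.getElem?_eq_getElem hi,
      Option.getD_some, Bool.false_and, Bool.false_eq_true, if_false, Bool.false_or]
    rw [List.range'_succ, List.filter_cons]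
    have htrig : pvTrig lines shape i =
        (PySem.Str.startswith lines[i] "{" &&
          (shape == PySem.Str.strip ((PySem.List.pyGet? lines ((i : Int) - 1)).getD ""))) := by
      simp [pvTrig, List.getElem?_eq_getElem hi]
    by_cases ht : (PySem.Str.startswith lines[i] "{" &&
        (shape == PySem.Str.strip ((PySem.List.pyGet? lines ((i : Int) - 1)).getD ""))) = true
    · rw [ht, htrig, ht, if_pos rfl]
      exact pvALoop_seeking lines c shape (i + 1)
    · rw [Bool.not_eq_true] at ht
      rw [ht, htrig, ht]
      simp only [Bool.false_eq_true, if_false]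
      exact ih (i + 1) (by omega)

-- A's whole algorithm equals B's whole (let-free) body, for any line list
theorem pv_main (lines : List String) (shape c : String) :
    pvALoop lines c shape false 0 =
      (match (PySem.List.pyRange 0 (lines.length : Int) 1).filter
          (fun i => PySem.Str.startswith ((PySem.List.pyGet? lines i).getD "") "{" &&
            (PySem.Str.strip ((PySem.List.pyGet? lines (i - 1)).getD "") == shape)) with
        | [] => false
        | t :: _ =>
          (PySem.List.slice (PySem.List.slice lines (some (t + 1)) none) none
              (some (match (PySem.List.pyRange 0 (((PySem.List.slice lines (some (t + 1)) none).length : Nat) : Int) 1).filter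
                  (fun j => PySem.Str.startswith ((PySem.List.pyGet? (PySem.List.slice lines (some (t + 1)) none) j).getD "") "}") with
                | [] => (((PySem.List.slice lines (some (t + 1)) none).length : Nat) : Int)
                | e :: _ => e + 1))).any
            (fun ln => PySem.Str.strip (PySem.Str.replace ln ";" "") == c)) := by
  rw [pvALoop_find lines c shape 0, pv_filter_pyRange,
    show (fun k : Nat => PySem.Str.startswith ((PySem.List.pyGet? lines (k : Int)).getD "") "{" &&
        (PySem.Str.strip ((PySem.List.pyGet? lines ((k : Int) - 1)).getD "") == shape)) =
        pvTrig lines shape from by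
      funext k
      simp only [pvTrig, PySem.List.pyGet?_natCast]
      rw [Bool.beq_comm (a := PySem.Str.strip ((PySem.List.pyGet? lines ((k : Int) - 1)).getD ""))],
    show List.range' 0 (lines.length - 0) = List.range lines.length from by
      simp [List.range_eq_range']]
  cases hf : List.filter (pvTrig lines shape) (List.range lines.length) with
  | nil => simp
  | cons t tl =>
    simp only [List.map_cons]
    rw [show ((t : Int) + 1) = ((t + 1 : Nat) : Int) from by push_cast; ring,
      PySem.List.slice_from_natCast]
    rw [pvScan_eq_decl c (lines.drop (t + 1)), pv_filter_pyRange,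
      show (fun k : Nat =>
          PySem.Str.startswith ((PySem.List.pyGet? (lines.drop (t + 1)) (k : Int)).getD "") "}") =
          (fun k : Nat => PySem.Str.startswith ((lines.drop (t + 1))[k]?.getD "") "}") from by
        funext k; simp [PySem.List.pyGet?_natCast]]
    cases hfe : List.filter (fun k : Nat =>
        PySem.Str.startswith ((lines.drop (t + 1))[k]?.getD "") "}")
        (List.range (lines.drop (t + 1)).length) with
    | nil =>
      simp only [List.map_nil, List.head?_nil, Option.map_none, Option.getD_none]
      rw [PySem.List.slice_to_natCast]
    | cons j jtl =>
      simp only [List.map_cons, List.head?_cons, Option.map_some, Option.getD_some]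
      rw [show ((j : Int) + 1) = ((j + 1 : Nat) : Int) from by push_cast; ring,
        PySem.List.slice_to_natCast]

-- ===== VERDICT (by name: the statement is the Claim_ definition above) =====
theorem shape_contains_constraint_spec : Claim_equal_shape_contains_constraint := by
  intro target_str shape constraint _
  unfold Spec_shape_contains_constraint shape_contains_constraint shape_contains_constraint_alt
  exact pv_main ((PySem.Str.split? target_str "\n").getD []) shape
    (PySem.Str.strip (PySem.Str.replace constraint ";" ""))
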